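-- pv_equiv track=rewrite | github.com/ElectionDataAnalysis/election_data_analysis | src/election_data_analysis/special_formats/__init__.py | strip_empties
-- ===== SOURCE A (Python) =====
-- def strip_empties(li: list) -> list:
--     # get rid of leading empty strings
--     first_useful = next(idx for idx in range(len(li)) if li[idx] != "")
--     li = li[first_useful:]
--
--     # get rid of trailing empty strings
--     li.reverse()
--     first_useful = next(idx for idx in range(len(li)) if li[idx] != "")
--     li = li[first_useful:]
--     li.reverse()
--
--     return li
-- ===== SOURCE B (Python) =====
-- def strip_empties(li: list) -> list:
--     # trim trailing empties, then leading empties, by moving two boundary indices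
--     j = len(li)
--     while j > 0 and li[j - 1] == "":
--         j -= 1
--     i = 0
--     while i < j and li[i] == "":
--         i += 1
--     return li[i:j]
-- ===== Notes on version B (the rewrite author's own statement) =====
-- stated objective: simpler
-- what changed: B moves two boundary indices (backward from the end, forward from the start) and takes one slice li[i:j], instead of A's scan/slice/reverse/scan/slice/reverse dance; B also returns [] on empty or all-empty input where A raises StopIteration.
-- outside the precondition, e.g. on strip_empties([]): A raises StopIteration, B returns []; on strip_empties(['']): A raises StopIteration, B returns []
-- crash fix: On a list with no non-empty string (including the empty list) A raises StopIteration from next(); B returns []. — e.g. on strip_empties([""]): A raises StopIteration, B returns []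
import Mathlib
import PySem

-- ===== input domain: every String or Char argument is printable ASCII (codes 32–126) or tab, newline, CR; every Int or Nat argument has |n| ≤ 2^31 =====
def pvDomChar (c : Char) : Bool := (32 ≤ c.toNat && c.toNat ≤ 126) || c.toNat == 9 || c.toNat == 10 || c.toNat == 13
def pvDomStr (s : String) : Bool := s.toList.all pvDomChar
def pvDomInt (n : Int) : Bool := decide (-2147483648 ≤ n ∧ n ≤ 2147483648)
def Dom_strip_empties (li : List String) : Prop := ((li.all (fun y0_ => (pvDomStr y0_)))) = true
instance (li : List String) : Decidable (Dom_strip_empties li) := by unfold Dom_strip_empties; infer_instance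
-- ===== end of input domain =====

-- B trims by moving two boundary indices and takes a single slice, instead of A's
-- scan / slice / reverse / scan / slice / reverse; same O(n) cost, simpler shape.
-- (Equivalence is about the return value; A never mutates its argument: it slices
-- before reversing.)

-- ===== PORT A =====
-- 'next(idx for idx in range(len(li)) if li[idx] != "")': index of the first
-- non-empty string, none = StopIteration (excluded by Pre_).
def strip_empties (li : List String) : List String :=
  match List.findIdx? (fun s => s != "") li with
  | none => []   -- StopIteration; unreachable under Pre_
  | some first_useful =>
    -- li = li[first_useful:]  (first_useful ≤ len, so the slice is a plain drop)
    let li1 := li.drop first_useful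
    -- li.reverse()
    let li2 := li1.reverse
    match List.findIdx? (fun s => s != "") li2 with
    | none => []   -- StopIteration; unreachable (li2 contains a non-empty string)
    | some first_useful2 => (li2.drop first_useful2).reverse

-- ===== PORT B =====
-- while j > 0 and li[j - 1] == "": j -= 1
def scanBack (li : List String) : Nat → Nat
  | 0 => 0
  | j + 1 => if li.getD j "" == "" then scanBack li j else j + 1

-- while i < j and li[i] == "": i += 1
def scanFwd (li : List String) (j i : Nat) : Nat :=
  if _h : i < j ∧ li.getD i "" == "" then scanFwd li j (i + 1) else i
termination_by j - i

def strip_empties_alt (li : List String) : List String :=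
  let j := scanBack li li.length
  let i := scanFwd li j 0
  -- li[i:j] with 0 ≤ i ≤ j ≤ len
  (li.drop i).take (j - i)

-- ===== PRECONDITION & SPEC =====
-- Pre_ excludes exactly the lists with no non-empty string (incl. []), where A's
-- next() raises StopIteration.
def Pre_strip_empties (li : List String) : Prop := ∃ s ∈ li, s ≠ ""
instance (li : List String) : Decidable (Pre_strip_empties li) := by unfold Pre_strip_empties; infer_instance
def pvWitness_strip_empties : List String := ["", "a", ""]

-- On a list with no non-empty string (including []) A raises StopIteration; B returns [].
def Raises_strip_empties (li : List String) : Prop := ∀ s ∈ li, s = ""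
instance (li : List String) : Decidable (Raises_strip_empties li) := by unfold Raises_strip_empties; infer_instance
def pvRaiseWitness_strip_empties : List String := [""]
def pvRaiseWitnessOut_strip_empties : List String := []

def Spec_strip_empties (li : List String) (out : List String) : Prop := out = strip_empties_alt li
instance (li : List String) (out : List String) : Decidable (Spec_strip_empties li out) := by unfold Spec_strip_empties; infer_instance

-- ===== CLAIM (what is proved, stated in full; the proofs are below) =====
def Claim_equal_strip_empties : Prop := ∀ (li : List String), Dom_strip_empties li → Pre_strip_empties li → Spec_strip_empties li (strip_empties li)
def Claim_raises_strip_empties : Prop := (∀ (li : List String), Dom_strip_empties li → Raises_strip_empties li → ¬ Pre_strip_empties li) ∧ (Dom_strip_empties (pvRaiseWitness_strip_empties) ∧ Raises_strip_empties (pvRaiseWitness_strip_empties) ∧ strip_empties_alt (pvRaiseWitness_strip_empties) = pvRaiseWitnessOut_strip_empties)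

-- ===== LEMMAS AND PROOFS =====

-- abbreviation used throughout the proof: "is the empty string" as a Bool predicate
def pvE (s : String) : Bool := s == ""

-- trim trailing empties
def pvTrimR (li : List String) : List String := (li.reverse.dropWhile pvE).reverse

lemma drop_findIdx (li : List String) (i : Nat)
    (h : List.findIdx? (fun s => s != "") li = some i) :
    li.drop i = li.dropWhile pvE := by
  induction li generalizing i with
  | nil => simp at h
  | cons a t ih =>
    by_cases ha : a = ""
    · subst ha
      simp [List.findIdx?_cons, pvE] at h ⊢
      obtain ⟨i', hi', rfl⟩ := h
      exact ih i' hi'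
    · simp [List.findIdx?_cons, ha, pvE] at h ⊢
      simp [← h]

lemma findIdx_none (li : List String)
    (h : List.findIdx? (fun s => s != "") li = none) :
    ∀ s ∈ li, s = "" := by
  intro s hs
  have := List.findIdx?_eq_none_iff.mp h s hs
  simpa using this

lemma mem_dropWhile_of_ne (li : List String) (s : String) (hs : s ∈ li) (hne : s ≠ "") :
    s ∈ li.dropWhile pvE := by
  have := List.takeWhile_append_dropWhile (p := pvE) (l := li)
  rw [← this] at hs
  rcases List.mem_append.mp hs with h | h
  · exact absurd (by simpa [pvE] using List.mem_takeWhile_imp h) hne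
  · exact h

lemma A_eq_trim (li : List String) (hp : Pre_strip_empties li) :
    strip_empties li = pvTrimR (li.dropWhile pvE) := by
  obtain ⟨s, hs, hne⟩ := hp
  unfold strip_empties
  cases h1 : List.findIdx? (fun s => s != "") li with
  | none => exact absurd (findIdx_none li h1 s hs) hne
  | some i =>
    simp only
    rw [drop_findIdx li i h1]
    have hsD : s ∈ (li.dropWhile pvE).reverse := by
      rw [List.mem_reverse]
      exact mem_dropWhile_of_ne li s hs hne
    cases h2 : List.findIdx? (fun s => s != "") (li.dropWhile pvE).reverse with
    | none => exact absurd (findIdx_none _ h2 s hsD) hne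
    | some k =>
      simp only
      rw [drop_findIdx _ k h2]
      rfl

lemma scanBack_append (xs : List String) (x : String) :
    ∀ j, j ≤ xs.length → scanBack (xs ++ [x]) j = scanBack xs j := by
  intro j
  induction j with
  | zero => intro; rfl
  | succ j ih =>
    intro hj
    have hg : (xs ++ [x]).getD j "" = xs.getD j "" := by
      have : j < xs.length := hj
      simp [List.getD, List.getElem?_append_left this]
    simp only [scanBack, hg]
    split <;> simp [ih (by omega)]

lemma scanBack_main (li : List String) :
    scanBack li li.length = (li.reverse.dropWhile pvE).length := by
  induction li using List.reverseRecOn with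
  | nil => rfl
  | append_singleton xs x ih =>
    have hlen : (xs ++ [x]).length = xs.length + 1 := by simp
    rw [hlen]
    by_cases hx : x = ""
    · subst hx
      have hg : (xs ++ [""]).getD xs.length "" = "" := by
        simp [List.getD]
      simp only [scanBack, hg]
      rw [scanBack_append xs "" xs.length le_rfl, ih]
      simp [pvE]
    · have hg : (xs ++ [x]).getD xs.length "" = x := by
        simp [List.getD]
      simp only [scanBack, hg]
      have : (x == "") = false := by simpa using hx
      simp [this, pvE]

lemma take_scanBack (li : List String) :
    li.take (scanBack li li.length) = pvTrimR li := by
  rw [scanBack_main]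
  have hdec : li = pvTrimR li ++ (li.reverse.takeWhile pvE).reverse := by
    unfold pvTrimR
    conv_lhs => rw [← List.reverse_reverse li,
      ← List.takeWhile_append_dropWhile (p := pvE) (l := li.reverse)]
    rw [List.reverse_append]
  conv_lhs => rw [hdec]
  rw [List.take_left']
  unfold pvTrimR; simp

lemma scanFwd_drop (li : List String) (j : Nat) (hj : j ≤ li.length) :
    ∀ i, i ≤ j → (li.take j).drop (scanFwd li j i) = ((li.take j).drop i).dropWhile pvE := by
  intro i hi
  induction hn : j - i using Nat.strong_induction_on generalizing i with
  | _ n ih =>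
    by_cases hc : i < j ∧ li.getD i "" == ""
    · rw [scanFwd, dif_pos hc]
      obtain ⟨hij, he⟩ := hc
      have hilen : i < li.length := lt_of_lt_of_le hij hj
      have hitl : i < (li.take j).length := by simp; omega
      have hstep : (li.take j).drop i = li[i] :: (li.take j).drop (i + 1) := by
        rw [List.drop_eq_getElem_cons hitl]
        congr 1
        simp
      have hgi : li[i] = li.getD i "" := by simp [List.getD, List.getElem?_eq_getElem hilen]
      have := ih (j - (i+1)) (by omega) (i+1) (by omega) rfl
      rw [this, hstep, List.dropWhile_cons]
      have : pvE li[i] = true := by rw [hgi]; simpa [pvE] using he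
      simp [this]
    · rw [scanFwd, dif_neg hc]
      rcases Nat.lt_or_ge i j with hij | hij
      · have hilen : i < li.length := lt_of_lt_of_le hij hj
        have hitl : i < (li.take j).length := by simp; omega
        have hstep : (li.take j).drop i = li[i] :: (li.take j).drop (i + 1) := by
          rw [List.drop_eq_getElem_cons hitl]
          congr 1
          simp
        have hgi : li[i] = li.getD i "" := by simp [List.getD, List.getElem?_eq_getElem hilen]
        have hne : pvE li[i] = false := by
          rw [hgi]
          have : ¬ (li.getD i "" == "") = true := fun h => hc ⟨hij, h⟩
          simpa [pvE] using this
        rw [hstep, List.dropWhile_cons, hne]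
        simp
      · have : i = j := le_antisymm hi hij
        subst this
        have : (li.take i).drop i = [] := by
          apply List.drop_eq_nil_of_le
          simp
        simp [this]

lemma B_eq_trim (li : List String) :
    strip_empties_alt li = (pvTrimR li).dropWhile pvE := by
  unfold strip_empties_alt
  have hj : scanBack li li.length ≤ li.length := by
    rw [scanBack_main]
    calc (li.reverse.dropWhile pvE).length ≤ li.reverse.length := List.length_dropWhile_le _ _
    _ = li.length := by simp
  have hi0 : (0:Nat) ≤ scanBack li li.length := Nat.zero_le _
  have h := scanFwd_drop li (scanBack li li.length) hj 0 hi0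
  simp only [List.drop_zero] at h
  simp only []
  rw [List.drop_take] at h
  rw [h, take_scanBack]

lemma pvE_head_dropWhile (l : List String) (b : String) (u : List String)
    (h : l.dropWhile pvE = b :: u) : pvE b = false := by
  induction l with
  | nil => simp at h
  | cons a t ih =>
    rw [List.dropWhile_cons] at h
    by_cases hp : pvE a = true
    · rw [if_pos hp] at h; exact ih h
    · rw [if_neg hp] at h
      cases h; simpa using hp

lemma decomp (li : List String) :
    li = pvTrimR li ++ (li.reverse.takeWhile pvE).reverse := by
  unfold pvTrimR
  conv_lhs => rw [← List.reverse_reverse li,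
    ← List.takeWhile_append_dropWhile (p := pvE) (l := li.reverse)]
  rw [List.reverse_append]

lemma trim_comm (li : List String) :
    (pvTrimR li).dropWhile pvE = pvTrimR (li.dropWhile pvE) := by
  by_cases hD : li.dropWhile pvE = []
  · have hall : ∀ x ∈ li, pvE x = true := List.dropWhile_eq_nil_iff.mp hD
    have hrev : li.reverse.dropWhile pvE = [] :=
      List.dropWhile_eq_nil_iff.mpr (fun x hx => hall x (List.mem_reverse.mp hx))
    simp [pvTrimR, hrev, hD]
  · set D := li.dropWhile pvE with hDdef
    obtain ⟨b, u, hbu⟩ := List.exists_cons_of_ne_nil hD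
    have heb : pvE b = false := pvE_head_dropWhile li b u (by rw [← hDdef]; exact hbu)
    have hDne : D.reverse.dropWhile pvE ≠ [] := by
      intro hnil
      have := List.dropWhile_eq_nil_iff.mp hnil b
        (List.mem_reverse.mpr (by rw [hbu]; exact List.mem_cons_self))
      rw [heb] at this; exact absurd this (by simp)
    have hTne : pvTrimR D ≠ [] := by
      unfold pvTrimR; simpa using hDne
    -- pvTrimR li = takeWhile pvE li ++ pvTrimR D
    have hrevli : li.reverse = D.reverse ++ (li.takeWhile pvE).reverse := by
      conv_lhs => rw [← List.takeWhile_append_dropWhile (p := pvE) (l := li)]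
      rw [List.reverse_append, hDdef]
    have hstep : pvTrimR li = li.takeWhile pvE ++ pvTrimR D := by
      unfold pvTrimR
      rw [hrevli, List.dropWhile_append]
      rw [if_neg (by simpa using hDne)]
      simp
    rw [hstep, List.dropWhile_append]
    have hE : (li.takeWhile pvE).dropWhile pvE = [] :=
      List.dropWhile_eq_nil_iff.mpr (fun x hx => List.mem_takeWhile_imp hx)
    rw [if_pos (by simp [hE])]
    -- the head of pvTrimR D is the head of D, whose pvE is false
    obtain ⟨a, t, hat⟩ := List.exists_cons_of_ne_nil hTne
    have hDa : D = a :: (t ++ (D.reverse.takeWhile pvE).reverse) := by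
      conv_lhs => rw [decomp D]
      rw [hat]; simp
    have hea : pvE a = false := pvE_head_dropWhile li a _ (by rw [← hDdef]; exact hDa)
    rw [hat, List.dropWhile_cons, hea]
    simp

-- ===== VERDICT (by name: the statement is the Claim_ definition above) =====
theorem strip_empties_spec : Claim_equal_strip_empties := by
  intro li _ hp
  unfold Spec_strip_empties
  rw [A_eq_trim li hp, B_eq_trim li, trim_comm]

@[simp] theorem strip_empties_raises : Claim_raises_strip_empties := by
  unfold Claim_raises_strip_empties
  constructor
  · intro li _ hr ⟨s, hs, hne⟩
    exact hne (hr s hs)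
  · refine ⟨by decide, by decide, ?_⟩
    show strip_empties_alt [""] = []
    simp [strip_empties_alt, scanBack, scanFwd, List.getD]
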